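-- pv_equiv track=rewrite | github.com/elifesciences/elife-bot | workflow/objects.py | last_activity_status
-- ===== SOURCE A (Python) =====
-- def last_activity_status(decision):
--     """
--     Given a decision response from SWF, determine whether the
--     last run activity Failed or Completed
--     """
--     status = None
--     # Traverse the array in reverse order
--     for event in decision["events"][::-1]:
--         if event["eventType"] == "ActivityTaskCompleted":
--             status = "ActivityTaskCompleted"
--             break
--         elif event["eventType"] == "ActivityTaskFailed":
--             status = "ActivityTaskFailed"
--             break
--
--     return status
-- ===== SOURCE B (Python) =====
-- def last_activity_status(decision):
--     status = None
--     for event in decision["events"]: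
--         t = event.get("eventType")
--         if t in ("ActivityTaskCompleted", "ActivityTaskFailed"):
--             status = t
--     return status
-- ===== Notes on version B (the rewrite author's own statement) =====
-- stated objective: simpler
-- what changed: Replaces A's reverse-slice scan with early break by a single forward pass keeping a running 'last seen' status via dict.get (no slicing, no break).
import Mathlib
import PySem

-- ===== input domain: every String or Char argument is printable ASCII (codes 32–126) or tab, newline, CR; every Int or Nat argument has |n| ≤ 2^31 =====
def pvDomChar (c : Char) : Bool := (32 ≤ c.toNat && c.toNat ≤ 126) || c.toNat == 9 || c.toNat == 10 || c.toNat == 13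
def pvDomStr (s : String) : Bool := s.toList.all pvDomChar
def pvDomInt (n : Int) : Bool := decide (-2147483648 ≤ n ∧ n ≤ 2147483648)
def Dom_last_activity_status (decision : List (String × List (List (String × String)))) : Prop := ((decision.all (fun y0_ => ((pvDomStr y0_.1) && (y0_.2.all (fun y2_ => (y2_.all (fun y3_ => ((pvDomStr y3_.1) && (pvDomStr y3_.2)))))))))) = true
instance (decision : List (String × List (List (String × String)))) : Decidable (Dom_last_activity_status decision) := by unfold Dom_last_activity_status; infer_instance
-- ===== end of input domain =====

-- One honest line: B replaces A's reverse-slice scan-with-break by a forward pass keeping a running last-seen status (dict.get, no slicing, no break).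

-- ===== PORT A =====
-- A's loop over decision["events"][::-1] with break; KeyError on a missing "eventType" maps to none (outside Pre_).
def pvScanRev : List (List (String × String)) → Option String
  | [] => none
  | e :: rest =>
    match List.lookup "eventType" e with
    | none => none          -- KeyError; outside Pre_
    | some t =>
      if t = "ActivityTaskCompleted" then some "ActivityTaskCompleted"
      else if t = "ActivityTaskFailed" then some "ActivityTaskFailed"
      else pvScanRev rest

def last_activity_status (decision : List (String × List (List (String × String)))) : Option String :=
  match List.lookup "events" decision with
  | none => none          -- KeyError on decision["events"]; outside Pre_
  | some evs =>
    match PySem.List.slice? evs none none (-1) with   -- evs[::-1]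
    | none => none
    | some r => pvScanRev r

-- ===== PORT B =====
-- B's forward loop: t := event.get("eventType"); if t is one of the two types, status := t.
def last_activity_status_alt (decision : List (String × List (List (String × String)))) : Option String :=
  match List.lookup "events" decision with
  | none => none          -- KeyError; outside Pre_
  | some evs =>
    evs.foldl (fun st e =>
      let t := List.lookup "eventType" e
      if t = some "ActivityTaskCompleted" ∨ t = some "ActivityTaskFailed" then t else st) none

-- ===== PRECONDITION & SPEC =====
-- true iff the event's "eventType" is one of the two activity statuses
def pvMatch (e : List (String × String)) : Bool :=
  List.lookup "eventType" e == some "ActivityTaskCompleted" ||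
  List.lookup "eventType" e == some "ActivityTaskFailed"

-- Pre_ excludes exactly the inputs on which Python A raises KeyError: a missing "events" key, or an
-- event without "eventType" reached by A's reverse scan before any completed/failed event.
def Pre_last_activity_status (decision : List (String × List (List (String × String)))) : Prop :=
  (List.lookup "events" decision).isSome = true ∧
  ∀ e ∈ ((List.lookup "events" decision).getD []).reverse.takeWhile (fun e => !pvMatch e),
    (List.lookup "eventType" e).isSome = true
instance (decision : List (String × List (List (String × String)))) : Decidable (Pre_last_activity_status decision) := by unfold Pre_last_activity_status; infer_instance

def pvWitness_last_activity_status : (List (String × List (List (String × String)))) :=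
  [("events", [[("eventType", "ActivityTaskFailed")], [("eventType", "ActivityTaskCompleted")]])]

def Spec_last_activity_status (decision : List (String × List (List (String × String)))) (out : Option String) : Prop := out = last_activity_status_alt decision
instance (decision : List (String × List (List (String × String)))) (out : Option String) : Decidable (Spec_last_activity_status decision out) := by unfold Spec_last_activity_status; infer_instance

-- ===== CLAIM (what is proved, stated in full; the proofs are below) =====
def Claim_equal_last_activity_status : Prop := ∀ (decision : List (String × List (List (String × String)))), Dom_last_activity_status decision → Pre_last_activity_status decision → Spec_last_activity_status decision (last_activity_status decision)

-- ===== LEMMAS AND PROOFS =====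

-- B's reverse-first-match reading, used only in the proofs
def pvScanB : List (List (String × String)) → Option String
  | [] => none
  | e :: rest =>
    let t := List.lookup "eventType" e
    if t = some "ActivityTaskCompleted" ∨ t = some "ActivityTaskFailed" then t else pvScanB rest

theorem pvScanB_append (xs ys : List (List (String × String))) :
    pvScanB (xs ++ ys) =
      match pvScanB xs with
      | some x => some x
      | none => pvScanB ys := by
  induction xs with
  | nil => simp [pvScanB]
  | cons e rest ih =>
    simp only [List.cons_append, pvScanB]
    split_ifs with h
    · obtain ⟨t, ht⟩ : ∃ t, List.lookup "eventType" e = some t := by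
        rcases h with h | h <;> exact ⟨_, h⟩
      simp [ht]
    · simp [ih]

theorem foldl_eq_pvScanB (evs : List (List (String × String))) (st : Option String) :
    evs.foldl (fun st e =>
      let t := List.lookup "eventType" e
      if t = some "ActivityTaskCompleted" ∨ t = some "ActivityTaskFailed" then t else st) st =
      match pvScanB evs.reverse with
      | some x => some x
      | none => st := by
  induction evs generalizing st with
  | nil => simp [pvScanB]
  | cons e rest ih =>
    simp only [List.foldl_cons, List.reverse_cons, pvScanB_append]
    rw [ih]
    cases pvScanB rest.reverse with
    | some x => rfl
    | none =>
      simp only [pvScanB]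
      split_ifs with h
      · obtain ⟨t, ht⟩ : ∃ t, List.lookup "eventType" e = some t := by
          rcases h with h | h <;> exact ⟨_, h⟩
        simp [ht]
      · rfl

theorem pvScanRev_eq_pvScanB (rs : List (List (String × String)))
    (h : ∀ e ∈ rs.takeWhile (fun e => !pvMatch e), (List.lookup "eventType" e).isSome = true) :
    pvScanRev rs = pvScanB rs := by
  induction rs with
  | nil => rfl
  | cons e rest ih =>
    by_cases hm : pvMatch e = true
    · have hm' : List.lookup "eventType" e = some "ActivityTaskCompleted" ∨
          List.lookup "eventType" e = some "ActivityTaskFailed" := by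
        simpa [pvMatch] using hm
      rcases hm' with h1 | h1 <;> simp [pvScanRev, pvScanB, h1]
    · have htw : (e :: rest).takeWhile (fun e => !pvMatch e) =
          e :: rest.takeWhile (fun e => !pvMatch e) := by
        simp [hm]
      have he : (List.lookup "eventType" e).isSome = true := by
        apply h; rw [htw]; simp
      obtain ⟨t, ht⟩ := Option.isSome_iff_exists.mp he
      have hnc : ¬ (t = "ActivityTaskCompleted") := by
        intro hc; apply hm; simp [pvMatch, ht, hc]
      have hnf : ¬ (t = "ActivityTaskFailed") := by
        intro hc; apply hm; simp [pvMatch, ht, hc]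
      have hrest : ∀ e' ∈ rest.takeWhile (fun e => !pvMatch e),
          (List.lookup "eventType" e').isSome = true := by
        intro e' hm'; apply h; rw [htw]; simp [hm']
      simp only [pvScanRev, pvScanB, ht]
      simp [hnc, hnf, ih hrest]

-- ===== VERDICT (by name: the statement is the Claim_ definition above) =====
theorem last_activity_status_spec : Claim_equal_last_activity_status := by
  intro decision _ hpre
  obtain ⟨hev, hC⟩ := hpre
  obtain ⟨evs, hevs⟩ := Option.isSome_iff_exists.mp hev
  unfold Spec_last_activity_status last_activity_status last_activity_status_alt
  rw [hevs] at hC ⊢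
  simp only [Option.getD_some] at hC
  dsimp only
  rw [PySem.List.slice?_none_none_neg_one]
  rw [foldl_eq_pvScanB]
  cases h : pvScanB evs.reverse <;>
    simp [pvScanRev_eq_pvScanB evs.reverse hC, h]
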